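-- pv_equiv track=rewrite | github.com/IceChickenTender/ToyProject-Comparison_of_entity_recognition_performance_by_model | bert/bert_inference.py | decode_ner_tags
-- ===== SOURCE A (Python) =====
-- def decode_ner_tags(original_text, valid_tokens):
--     """
--     valid_tokens: [(start_idx, end_idx, label), ...]
--     BIO 태그를 파싱하여 <단어:태그> 형태로 변환
--     """
--     result_text = ""
--     last_idx = 0
--
--     # 개체명 묶기 (Chunking) 로직
--     current_entity = None # {'start': 0, 'end': 0, 'label': 'QT'}
--
--     entities = []
--
--     for start, end, label in valid_tokens:
--         # BIO 태그 분석
--         if label.startswith("B-"):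
--             # 이전 개체명이 있었다면 저장
--             if current_entity:
--                 entities.append(current_entity)
--
--             # 새로운 개체명 시작
--             entity_type = label.split("-")[1]
--             current_entity = {
--                 "start": start,
--                 "end": end,
--                 "label": entity_type
--             }
--
--         elif label.startswith("I-"):
--             # 현재 진행 중인 개체명이 있고, 타입이 같다면 범위 확장
--             if current_entity and label.split("-")[1] == current_entity['label']:
--                 current_entity['end'] = end
--             else:
--                 # 문법적으로 맞지 않는 I 태그가 나오면(B 없이 I 등),
--                 # 이전 개체명 닫고 새로 시작하거나 무시 (여기서는 새로 시작으로 처리)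
--                 if current_entity:
--                     entities.append(current_entity)
--
--                 entity_type = label.split("-")[1]
--                 current_entity = {
--                     "start": start,
--                     "end": end,
--                     "label": entity_type
--                 }
--
--         else: # 'O' 태그
--             if current_entity:
--                 entities.append(current_entity)
--                 current_entity = None
--
--     # 마지막에 남은 개체명 처리
--     if current_entity:
--         entities.append(current_entity)
--
--     # 4. 원본 텍스트에 태그 삽입 (뒤에서부터 작업하면 인덱스가 꼬이지 않음 -> 여기선 순차적으로 작성)
--     # 순차적으로 문자열 조립
--     processed_idx = 0
--     final_output = ""
--
--     for entity in entities:
--         start = entity['start']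
--         end = entity['end']
--         label = entity['label']
--
--         # 개체명 앞부분 붙이기
--         final_output += original_text[processed_idx:start]
--
--         # 개체명 부분 포맷팅
--         entity_text = original_text[start:end]
--         final_output += f"<{entity_text}:{label}>"
--
--         processed_idx = end
--
--     # 남은 뒷부분 붙이기
--     final_output += original_text[processed_idx:]
--
--     return final_output
-- ===== SOURCE B (Python) =====
-- def decode_ner_tags(original_text, valid_tokens):
--     """Single pass: emit each entity into the output as soon as it is closed."""
--     final_output = ""
--     processed_idx = 0
--     cur = None  # (start, end, type)
--     for start, end, label in valid_tokens:
--         if cur is not None and label.startswith("I-") and label.split("-")[1] == cur[2]: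
--             cur = (cur[0], end, cur[2])
--         else:
--             if cur is not None:
--                 s, e, t = cur
--                 final_output += original_text[processed_idx:s] + f"<{original_text[s:e]}:{t}>"
--                 processed_idx = e
--             if label.startswith("B-") or label.startswith("I-"):
--                 cur = (start, end, label.split("-")[1])
--             else:
--                 cur = None
--     if cur is not None:
--         s, e, t = cur
--         final_output += original_text[processed_idx:s] + f"<{original_text[s:e]}:{t}>"
--         processed_idx = e
--     return final_output + original_text[processed_idx:]
-- ===== Notes on version B (the rewrite author's own statement) =====
-- stated objective: simpler
-- what changed: A chunks BIO tags into an entities list in one loop and then splices them into the text in a second loop; B is a single fused pass that emits each entity into the output the moment it closes, with no intermediate entities list.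
import Mathlib
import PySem

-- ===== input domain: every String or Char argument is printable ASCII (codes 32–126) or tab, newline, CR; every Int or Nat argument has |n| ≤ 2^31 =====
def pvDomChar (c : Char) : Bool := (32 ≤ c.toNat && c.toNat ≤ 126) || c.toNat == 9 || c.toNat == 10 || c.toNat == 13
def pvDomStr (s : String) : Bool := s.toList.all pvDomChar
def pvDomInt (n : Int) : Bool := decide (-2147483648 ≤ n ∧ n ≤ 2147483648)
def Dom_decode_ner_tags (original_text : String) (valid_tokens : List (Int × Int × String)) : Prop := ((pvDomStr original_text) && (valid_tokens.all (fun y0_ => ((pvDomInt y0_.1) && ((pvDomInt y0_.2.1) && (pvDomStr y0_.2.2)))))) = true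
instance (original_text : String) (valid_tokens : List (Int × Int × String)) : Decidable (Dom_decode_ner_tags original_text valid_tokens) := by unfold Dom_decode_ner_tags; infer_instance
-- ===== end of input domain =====

-- B fuses A's two phases into one pass that emits each entity as soon as it closes (objective: simpler, same cost).

-- label.split("-")[1] (both Pythons compute it only for labels starting with "B-"/"I-", so index 1 always exists)
def pvTagType (label : String) : String :=
  (PySem.List.pyGet? ((PySem.Str.split? label "-").getD []) 1).getD ""

-- ===== PORT A =====
-- phase 1 loop body: chunk BIO tags into (entities, current_entity)
def pvAStep (st : List (Int × Int × String) × Option (Int × Int × String))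
    (tok : Int × Int × String) : List (Int × Int × String) × Option (Int × Int × String) :=
  if PySem.Str.startswith tok.2.2 "B-" then
    ((match st.2 with | some c => st.1 ++ [c] | none => st.1),
     some (tok.1, tok.2.1, pvTagType tok.2.2))
  else if PySem.Str.startswith tok.2.2 "I-" then
    match st.2 with
    | some c =>
        if pvTagType tok.2.2 == c.2.2 then (st.1, some (c.1, tok.2.1, c.2.2))
        else (st.1 ++ [c], some (tok.1, tok.2.1, pvTagType tok.2.2))
    | none => (st.1, some (tok.1, tok.2.1, pvTagType tok.2.2))
  else
    ((match st.2 with | some c => st.1 ++ [c] | none => st.1), none)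

-- phase 2 loop body: splice one entity into the output; state = (processed_idx, final_output)
def pvAEmit (original_text : String) (st : Int × String) (ent : Int × Int × String) : Int × String :=
  (ent.2.1,
   st.2 ++ PySem.Str.slice original_text (some st.1) (some ent.1)
        ++ "<" ++ PySem.Str.slice original_text (some ent.1) (some ent.2.1)
        ++ ":" ++ ent.2.2 ++ ">")

def decode_ner_tags (original_text : String) (valid_tokens : List (Int × Int × String)) : String :=
  let r := valid_tokens.foldl pvAStep ([], none)
  let ents := r.1 ++ r.2.toList
  let st := ents.foldl (pvAEmit original_text) (0, "")
  st.2 ++ PySem.Str.slice original_text (some st.1) none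

-- ===== PORT B =====
-- close the pending entity: append text up to it plus its tag; returns (final_output, processed_idx)
def pvBEmit (original_text : String) (st : String × Int) (ent : Int × Int × String) : String × Int :=
  (st.1 ++ PySem.Str.slice original_text (some st.2) (some ent.1)
        ++ "<" ++ PySem.Str.slice original_text (some ent.1) (some ent.2.1)
        ++ ":" ++ ent.2.2 ++ ">",
   ent.2.1)

-- single-pass loop body; state = (final_output, processed_idx, cur)
def pvBStep (original_text : String) (st : String × Int × Option (Int × Int × String))
    (tok : Int × Int × String) : String × Int × Option (Int × Int × String) :=
  match st.2.2 with
  | some c =>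
      if PySem.Str.startswith tok.2.2 "I-" && (pvTagType tok.2.2 == c.2.2) then
        (st.1, st.2.1, some (c.1, tok.2.1, c.2.2))
      else
        let e := pvBEmit original_text (st.1, st.2.1) c
        if PySem.Str.startswith tok.2.2 "B-" || PySem.Str.startswith tok.2.2 "I-" then
          (e.1, e.2, some (tok.1, tok.2.1, pvTagType tok.2.2))
        else (e.1, e.2, none)
  | none =>
      if PySem.Str.startswith tok.2.2 "B-" || PySem.Str.startswith tok.2.2 "I-" then
        (st.1, st.2.1, some (tok.1, tok.2.1, pvTagType tok.2.2))
      else (st.1, st.2.1, none)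

def decode_ner_tags_alt (original_text : String) (valid_tokens : List (Int × Int × String)) : String :=
  let r := valid_tokens.foldl (pvBStep original_text) ("", 0, none)
  let f := match r.2.2 with
    | some c => pvBEmit original_text (r.1, r.2.1) c
    | none => (r.1, r.2.1)
  f.1 ++ PySem.Str.slice original_text (some f.2) none

-- ===== PRECONDITION & SPEC =====
def Spec_decode_ner_tags (original_text : String) (valid_tokens : List (Int × Int × String)) (out : String) : Prop := out = decode_ner_tags_alt original_text valid_tokens
instance (original_text : String) (valid_tokens : List (Int × Int × String)) (out : String) : Decidable (Spec_decode_ner_tags original_text valid_tokens out) := by unfold Spec_decode_ner_tags; infer_instance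

-- ===== CLAIM (what is proved, stated in full; the proofs are below) =====
def Claim_equal_decode_ner_tags : Prop := ∀ (original_text : String) (valid_tokens : List (Int × Int × String)), Dom_decode_ner_tags original_text valid_tokens → Spec_decode_ner_tags original_text valid_tokens (decode_ner_tags original_text valid_tokens)

-- ===== LEMMAS AND PROOFS =====

-- a string cannot start with both "B-" and "I-"
lemma pv_not_both (l : String) (hB : PySem.Str.startswith l "B-" = true)
    (hI : PySem.Str.startswith l "I-" = true) : False := by
  have hB' : ("B-" : String).toList <+: l.toList := by
    simpa using (PySem.Chars.startswith_iff _ _).mp (by simpa using hB)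
  have hI' : ("I-" : String).toList <+: l.toList := by
    simpa using (PySem.Chars.startswith_iff _ _).mp (by simpa using hI)
  obtain ⟨t1, h1⟩ := hB'
  obtain ⟨t2, h2⟩ := hI'
  rw [← h1] at h2
  simp at h2

-- A's phase-1 fold only appends to the accumulated entities list
lemma pvAStep_shift (ents : List (Int × Int × String)) (cur : Option (Int × Int × String))
    (tok : Int × Int × String) :
    pvAStep (ents, cur) tok
      = (ents ++ (pvAStep ([], cur) tok).1, (pvAStep ([], cur) tok).2) := by
  cases cur <;> simp [pvAStep] <;> split_ifs <;> simp

lemma pvA_prefix : ∀ (toks : List (Int × Int × String)) (ents : List (Int × Int × String))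
    (cur : Option (Int × Int × String)),
    List.foldl pvAStep (ents, cur) toks
      = (ents ++ (List.foldl pvAStep ([], cur) toks).1,
         (List.foldl pvAStep ([], cur) toks).2)
  | [], ents, cur => by simp
  | t :: ts, ents, cur => by
      rw [List.foldl_cons, List.foldl_cons, pvAStep_shift ents cur t,
          pvA_prefix ts (ents ++ (pvAStep ([], cur) t).1) (pvAStep ([], cur) t).2,
          pvA_prefix ts (pvAStep ([], cur) t).1 (pvAStep ([], cur) t).2]
      cases pvAStep ([], cur) t
      simp

-- B's eager emission equals A's deferred emission over the entities A collects
lemma pv_main (text : String) : ∀ (toks : List (Int × Int × String)) (out : String)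
    (pos : Int) (cur : Option (Int × Int × String)),
    List.foldl (pvBStep text) (out, pos, cur) toks
      = ((List.foldl (pvAEmit text) (pos, out) (List.foldl pvAStep ([], cur) toks).1).2,
         (List.foldl (pvAEmit text) (pos, out) (List.foldl pvAStep ([], cur) toks).1).1,
         (List.foldl pvAStep ([], cur) toks).2)
  | [], out, pos, cur => by simp
  | t :: ts, out, pos, cur => by
      rw [List.foldl_cons, List.foldl_cons]
      have hone :
          List.foldl pvAStep (pvAStep ([], cur) t) ts
            = ((pvAStep ([], cur) t).1 ++ (List.foldl pvAStep ([], (pvAStep ([], cur) t).2) ts).1,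
               (List.foldl pvAStep ([], (pvAStep ([], cur) t).2) ts).2) := by
        rw [show pvAStep ([], cur) t = ((pvAStep ([], cur) t).1, (pvAStep ([], cur) t).2) from rfl,
            pvA_prefix]
      rw [hone]
      by_cases hB : PySem.Str.startswith t.2.2 "B-" = true
      · have hI : PySem.Str.startswith t.2.2 "I-" = false := by
          by_contra h
          exact pv_not_both _ hB (by simpa using h)
        cases cur with
        | none =>
            simp only [pvAStep, pvBStep, hB, hI, if_true, Bool.false_and, if_false,
              Bool.false_or, Bool.or_comm] 
            rw [pv_main text ts _ _ _]
            simp [hB]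
        | some c =>
            simp only [pvAStep, pvBStep, hB, hI, if_true, Bool.false_and, if_false]
            rw [pv_main text ts _ _ _]
            simp [hB, pvAEmit, pvBEmit]
      · by_cases hI : PySem.Str.startswith t.2.2 "I-" = true
        · cases cur with
          | none =>
              simp only [pvAStep, pvBStep, hB, hI, if_false, if_true, Bool.true_and]
              rw [pv_main text ts _ _ _]
              simp [hB, hI]
          | some c =>
              by_cases hM : (pvTagType t.2.2 == c.2.2) = true
              · simp only [pvAStep, pvBStep, hB, hI, hM, if_false, if_true, Bool.true_and]
                rw [pv_main text ts _ _ _]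
                simp [hB, hI, hM]
              · simp only [pvAStep, pvBStep, hB, hI, hM, if_false, if_true, Bool.true_and]
                rw [pv_main text ts _ _ _]
                simp [hB, hI, hM, pvAEmit, pvBEmit]
        · cases cur with
          | none =>
              simp only [pvAStep, pvBStep, hB, hI]
              rw [pv_main text ts _ _ _]
              simp [hB, hI]
          | some c =>
              simp only [pvAStep, pvBStep, hB, hI, Bool.false_and, if_false]
              rw [pv_main text ts _ _ _]
              simp [hB, hI, pvAEmit, pvBEmit]

-- ===== VERDICT (by name: the statement is the Claim_ definition above) =====
theorem decode_ner_tags_spec : Claim_equal_decode_ner_tags := by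
  intro text toks _
  unfold Spec_decode_ner_tags decode_ner_tags decode_ner_tags_alt
  rw [pv_main text toks "" 0 none]
  cases h : (List.foldl pvAStep ([], none) toks).2 with
  | none => simp [h]
  | some c => simp [h, List.foldl_append, pvAEmit, pvBEmit]
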